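-- pv_equiv track=rewrite | github.com/loveytheb/algorithmquiz | 프로그래머스/0/120956. 옹알이 （1）/옹알이 （1）.py | solution
-- ===== SOURCE A (Python) =====
-- def solution(babbling):
--     valid_words = ["aya", "ye", "woo", "ma"]
--     count = 0
--
--     for word in babbling:
--         temp = word
--         for valid in valid_words:
--             temp = temp.replace(valid, " ")
--         # 남은 문자가 없으면 발음 가능한 단어
--         if temp.strip() == "":
--             count += 1
--
--     return count
-- ===== SOURCE B (Python) =====
-- def solution(babbling):
--     frags = ("aya", "ye", "woo", "ma")
--     count = 0
--     for word in babbling: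
--         i, ok = 0, True
--         while i < len(word):
--             for f in frags:
--                 if word.startswith(f, i):
--                     i += len(f)
--                     break
--             else:
--                 if word[i].isspace():
--                     i += 1
--                 else:
--                     ok = False
--                     break
--         if ok:
--             count += 1
--     return count
-- ===== Notes on version B (the rewrite author's own statement) =====
-- stated objective: alternative
-- what changed: Replaces A's four whole-string str.replace passes plus strip with a single left-to-right scan per word that consumes the unique fragment (or one whitespace char) determined at each position; this is valid because the four fragments have pairwise-distinct first characters, so segmentation is deterministic.
import Mathlib
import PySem

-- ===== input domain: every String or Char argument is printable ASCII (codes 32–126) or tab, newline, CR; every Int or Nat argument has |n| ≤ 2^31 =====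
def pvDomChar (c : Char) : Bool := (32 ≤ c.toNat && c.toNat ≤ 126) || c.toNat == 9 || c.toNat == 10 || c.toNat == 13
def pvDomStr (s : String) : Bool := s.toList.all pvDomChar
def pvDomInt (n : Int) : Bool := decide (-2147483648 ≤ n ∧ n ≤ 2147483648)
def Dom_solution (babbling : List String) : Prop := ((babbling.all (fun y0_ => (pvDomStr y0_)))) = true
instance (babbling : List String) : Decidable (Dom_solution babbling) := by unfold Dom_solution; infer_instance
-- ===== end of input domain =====

-- B replaces A's four whole-string str.replace passes + strip by a single left-to-right
-- scan per word (at each position the matching fragment is unique, so the scan is deterministic).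

-- ===== PORT A =====
def solution (babbling : List String) : Int :=
  let valid_words : List String := ["aya", "ye", "woo", "ma"]
  babbling.foldl (fun count word =>
    let temp := valid_words.foldl (fun temp valid => PySem.Str.replace temp valid " ") word
    if PySem.Str.strip temp == "" then count + 1 else count) 0

-- ===== PORT B =====
-- helper: B's per-word while loop over an index = recursion consuming the matched prefix
def okChars : List Char → Bool
  | [] => true
  | c :: t =>
    if ['a','y','a'].isPrefixOf (c :: t) then okChars (List.drop 2 t)
    else if ['y','e'].isPrefixOf (c :: t) then okChars (List.drop 1 t)
    else if ['w','o','o'].isPrefixOf (c :: t) then okChars (List.drop 2 t)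
    else if ['m','a'].isPrefixOf (c :: t) then okChars (List.drop 1 t)
    else PySem.Chars.isspace c && okChars t
termination_by s => s.length
decreasing_by
  · simp only [List.length_cons, List.length_drop]; omega
  · simp only [List.length_cons, List.length_drop]; omega
  · simp only [List.length_cons, List.length_drop]; omega
  · simp only [List.length_cons, List.length_drop]; omega
  · simp only [List.length_cons]; omega

def solution_alt (babbling : List String) : Int :=
  babbling.foldl (fun count word => if okChars word.toList then count + 1 else count) 0

-- ===== PRECONDITION & SPEC =====
def Spec_solution (babbling : List String) (out : Int) : Prop := out = solution_alt babbling
instance (babbling : List String) (out : Int) : Decidable (Spec_solution babbling out) := by unfold Spec_solution; infer_instance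

-- ===== CLAIM (what is proved, stated in full; the proofs are below) =====
def Claim_equal_solution : Prop := ∀ (babbling : List String), Dom_solution babbling → Spec_solution babbling (solution babbling)

-- ===== LEMMAS AND PROOFS =====

-- Python's str.replace(old, ' ') as a direct left-to-right recursion (proof model of A's passes)
def rep (pat : List Char) : List Char → List Char
  | [] => []
  | c :: t =>
    if pat.isPrefixOf (c :: t) && !pat.isEmpty then ' ' :: rep pat (List.drop (pat.length - 1) t)
    else c :: rep pat t
termination_by s => s.length
decreasing_by
  · simp only [List.length_cons, List.length_drop]; omega
  · simp only [List.length_cons]; omega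

lemma go_eq (pat : List Char) (hp : pat ≠ []) :
    ∀ (fuel : Nat) (s acc : List Char), s.length ≤ fuel →
      PySem.Chars.replace.go pat [' '] fuel s acc = acc.reverse ++ rep pat s := by
  intro fuel
  induction fuel with
  | zero =>
    intro s acc h
    have : s = [] := by cases s <;> simp_all
    subst this
    simp [PySem.Chars.replace.go, rep]
  | succ n ih =>
    intro s acc h
    cases s with
    | nil => simp [PySem.Chars.replace.go, rep]
    | cons c t =>
      rw [PySem.Chars.replace.go]
      by_cases hpre : pat.isPrefixOf (c :: t)
      · rw [if_pos hpre]
        rw [ih _ _ (by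
          have h2 : 1 ≤ pat.length := by cases pat <;> simp_all
          simp only [List.length_drop, List.length_cons] at *
          omega)]
        rw [rep]
        rw [if_pos (by simp [hpre, hp])]
        have hd : List.drop pat.length (c :: t) = List.drop (pat.length - 1) t := by
          cases pat with
          | nil => simp_all
          | cons p ps => simp
        rw [hd]
        simp
      · rw [if_neg hpre]
        rw [ih _ _ (by simp at h; omega)]
        rw [rep]
        rw [if_neg (by simp [hpre])]
        simp

lemma replace_eq_rep (pat : List Char) (hp : pat ≠ []) (s : List Char) :
    PySem.Chars.replace s pat [' '] = rep pat s := by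
  rw [PySem.Chars.replace]
  rw [if_neg (by simp [hp])]
  exact go_eq pat hp s.length s [] (le_refl _)

lemma strip_eq_nil_iff (s : List Char) :
    PySem.Chars.strip s = [] ↔ s.all PySem.Chars.isspace = true := by
  rw [PySem.Chars.strip, PySem.Chars.rstrip, PySem.Chars.lstrip]
  rw [List.reverse_eq_nil_iff, List.dropWhile_eq_nil_iff]
  simp only [List.mem_reverse, List.all_eq_true]
  constructor
  · intro h x hx
    by_cases hxd : x ∈ List.dropWhile PySem.Chars.isspace s
    · exact h x hxd
    · have hsplit := List.takeWhile_append_dropWhile (p := PySem.Chars.isspace) (l := s)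
      rw [← hsplit] at hx
      rcases List.mem_append.mp hx with hm | hm
      · exact List.mem_takeWhile_imp hm
      · exact absurd hm hxd
  · intro h x hx
    exact h x ((List.dropWhile_sublist _).subset hx)

lemma rep_head (pat : List Char) (s : List Char) (c : Char)
    (h : (rep pat s).head? = some c) : c = ' ' ∨ s.head? = some c := by
  cases s with
  | nil => rw [rep] at h; simp at h
  | cons d t =>
    rw [rep] at h
    split at h
    · left; simp only [List.head?_cons, Option.some.injEq] at h; exact h.symm
    · right; simp only [List.head?_cons, Option.some.injEq] at h ⊢; exact h

lemma npf {b : Bool} (h : b = false) : ¬ (b = true) := by simp [h]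

lemma bfalse {b : Bool} (h : ¬ b = true) : b = false := by
  cases b
  · rfl
  · exact absurd rfl h

lemma rep_cons_t (pat : List Char) (c : Char) (t : List Char)
    (h : pat.isPrefixOf (c :: t) = true) (hp : pat.isEmpty = false) :
    rep pat (c :: t) = ' ' :: rep pat (List.drop (pat.length - 1) t) := by
  rw [rep, if_pos (by rw [h, hp]; rfl)]

lemma rep_cons_f (pat : List Char) (c : Char) (t : List Char)
    (h : pat.isPrefixOf (c :: t) = false) :
    rep pat (c :: t) = c :: rep pat t := by
  rw [rep, if_neg (npf (by rw [h]; rfl))]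

-- the four-pass pipeline of A, in list form
def pipe (w : List Char) : List Char :=
  rep ['m','a'] (rep ['w','o','o'] (rep ['y','e'] (rep ['a','y','a'] w)))

lemma prefix1 (a : Char) (X : List Char) :
    ([a].isPrefixOf X = true) ↔ X.head? = some a := by
  cases X with
  | nil => simp [List.isPrefixOf]
  | cons x xs =>
    rw [show ([a].isPrefixOf (x :: xs)) = (a == x && true) from rfl]
    simp only [Bool.and_true, beq_iff_eq, List.head?_cons, Option.some.injEq]
    exact ⟨fun h => h.symm, fun h => h.symm⟩

lemma oo_lift (t : List Char)
    (h : ['o','o'].isPrefixOf (rep ['y','e'] (rep ['a','y','a'] t)) = true) :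
    ['o','o'].isPrefixOf t = true := by
  cases t with
  | nil => rw [rep, rep] at h; exact absurd h (npf rfl)
  | cons d t' =>
    rw [rep] at h
    by_cases h1 : (['a','y','a'].isPrefixOf (d :: t') && !(['a','y','a'] : List Char).isEmpty) = true
    · rw [if_pos h1] at h
      rw [rep] at h
      by_cases h2 : (['y','e'].isPrefixOf
          (' ' :: rep ['a','y','a'] (List.drop (['a','y','a'].length - 1) t')) &&
          !(['y','e'] : List Char).isEmpty) = true
      · exact absurd h2 (npf rfl)
      · rw [if_neg h2] at h
        exact absurd h (npf rfl)
    · rw [if_neg h1] at h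
      rw [rep] at h
      by_cases h2 : (['y','e'].isPrefixOf (d :: rep ['a','y','a'] t') &&
          !(['y','e'] : List Char).isEmpty) = true
      · rw [if_pos h2] at h
        exact absurd h (npf rfl)
      · rw [if_neg h2] at h
        rw [show (['o','o'].isPrefixOf (d :: rep ['y','e'] (rep ['a','y','a'] t')))
            = (('o' == d) && ['o'].isPrefixOf (rep ['y','e'] (rep ['a','y','a'] t'))) from rfl] at h
        simp only [Bool.and_eq_true, beq_iff_eq] at h
        obtain ⟨hdo, ho2⟩ := h
        subst hdo
        have hh : (rep ['y','e'] (rep ['a','y','a'] t')).head? = some 'o' := (prefix1 'o' _).mp ho2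
        rcases rep_head _ _ _ hh with hsp | hh2
        · exact absurd hsp (by decide)
        · rcases rep_head _ _ _ hh2 with hsp | hh3
          · exact absurd hsp (by decide)
          · cases t' with
            | nil => simp at hh3
            | cons e t'' =>
              simp only [List.head?_cons, Option.some.injEq] at hh3
              subst hh3
              rfl

lemma pipe_head3 (t : List Char) (c : Char)
    (h : (rep ['w','o','o'] (rep ['y','e'] (rep ['a','y','a'] t))).head? = some c) :
    c = ' ' ∨ t.head? = some c := by
  rcases rep_head _ _ _ h with hs | h2
  · exact Or.inl hs
  rcases rep_head _ _ _ h2 with hs | h3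
  · exact Or.inl hs
  rcases rep_head _ _ _ h3 with hs | h4
  · exact Or.inl hs
  · exact Or.inr h4

lemma pipe_nil : pipe [] = [] := by
  unfold pipe
  rw [rep, rep, rep, rep]

lemma pipe_aya (u : List Char) : pipe ('a'::'y'::'a'::u) = ' ' :: pipe u := by
  unfold pipe
  rw [rep_cons_t ['a','y','a'] 'a' ('y'::'a'::u) rfl rfl]
  rw [show List.drop ((['a','y','a'] : List Char).length - 1) ('y'::'a'::u) = u from rfl]
  rw [rep_cons_f ['y','e'] ' ' _ rfl]
  rw [rep_cons_f ['w','o','o'] ' ' _ rfl]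
  rw [rep_cons_f ['m','a'] ' ' _ rfl]

lemma pipe_ye (u : List Char) : pipe ('y'::'e'::u) = ' ' :: pipe u := by
  unfold pipe
  rw [rep_cons_f ['a','y','a'] 'y' _ rfl, rep_cons_f ['a','y','a'] 'e' _ rfl]
  rw [rep_cons_t ['y','e'] 'y' ('e' :: rep ['a','y','a'] u) rfl rfl]
  rw [show List.drop ((['y','e'] : List Char).length - 1) ('e' :: rep ['a','y','a'] u)
      = rep ['a','y','a'] u from rfl]
  rw [rep_cons_f ['w','o','o'] ' ' _ rfl]
  rw [rep_cons_f ['m','a'] ' ' _ rfl]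

lemma pipe_woo (u : List Char) : pipe ('w'::'o'::'o'::u) = ' ' :: pipe u := by
  unfold pipe
  rw [rep_cons_f ['a','y','a'] 'w' _ rfl, rep_cons_f ['a','y','a'] 'o' _ rfl,
      rep_cons_f ['a','y','a'] 'o' _ rfl]
  rw [rep_cons_f ['y','e'] 'w' _ rfl, rep_cons_f ['y','e'] 'o' _ rfl,
      rep_cons_f ['y','e'] 'o' _ rfl]
  rw [rep_cons_t ['w','o','o'] 'w' ('o'::'o':: rep ['y','e'] (rep ['a','y','a'] u)) rfl rfl]
  rw [show List.drop ((['w','o','o'] : List Char).length - 1)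
      ('o'::'o':: rep ['y','e'] (rep ['a','y','a'] u)) = rep ['y','e'] (rep ['a','y','a'] u) from rfl]
  rw [rep_cons_f ['m','a'] ' ' _ rfl]

lemma pipe_ma (u : List Char) (hya : ['y','a'].isPrefixOf u = false) :
    pipe ('m'::'a'::u) = ' ' :: pipe u := by
  unfold pipe
  rw [rep_cons_f ['a','y','a'] 'm' _ rfl]
  rw [rep_cons_f ['a','y','a'] 'a' _
      (by rw [show (['a','y','a'].isPrefixOf ('a'::u)) = (['y','a'].isPrefixOf u) from by
            rw [show (['a','y','a'].isPrefixOf ('a'::u))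
                = (('a' == 'a') && ['y','a'].isPrefixOf u) from rfl]
            rfl]
          exact hya)]
  rw [rep_cons_f ['y','e'] 'm' _ rfl, rep_cons_f ['y','e'] 'a' _ rfl]
  rw [rep_cons_f ['w','o','o'] 'm' _ rfl, rep_cons_f ['w','o','o'] 'a' _ rfl]
  rw [rep_cons_t ['m','a'] 'm' ('a' :: rep ['w','o','o'] (rep ['y','e'] (rep ['a','y','a'] u))) rfl rfl]
  rw [show List.drop ((['m','a'] : List Char).length - 1)
      ('a' :: rep ['w','o','o'] (rep ['y','e'] (rep ['a','y','a'] u)))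
      = rep ['w','o','o'] (rep ['y','e'] (rep ['a','y','a'] u)) from rfl]

lemma pipe_maya (v : List Char) : pipe ('m'::'a'::'y'::'a'::v) = 'm' :: ' ' :: pipe v := by
  unfold pipe
  rw [rep_cons_f ['a','y','a'] 'm' _ rfl]
  rw [rep_cons_t ['a','y','a'] 'a' ('y'::'a'::v) rfl rfl]
  rw [show List.drop ((['a','y','a'] : List Char).length - 1) ('y'::'a'::v) = v from rfl]
  rw [rep_cons_f ['y','e'] 'm' _ rfl, rep_cons_f ['y','e'] ' ' _ rfl]
  rw [rep_cons_f ['w','o','o'] 'm' _ rfl, rep_cons_f ['w','o','o'] ' ' _ rfl]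
  rw [rep_cons_f ['m','a'] 'm' _ rfl, rep_cons_f ['m','a'] ' ' _ rfl]

lemma pipe_other (c : Char) (t : List Char)
    (h1 : ['a','y','a'].isPrefixOf (c :: t) = false)
    (h2 : ['y','e'].isPrefixOf (c :: t) = false)
    (h3 : ['w','o','o'].isPrefixOf (c :: t) = false)
    (h4 : ['m','a'].isPrefixOf (c :: t) = false) :
    pipe (c :: t) = c :: pipe t := by
  unfold pipe
  rw [rep_cons_f _ _ _ h1]
  have n2 : ['y','e'].isPrefixOf (c :: rep ['a','y','a'] t) = false := by
    cases hx : ['y','e'].isPrefixOf (c :: rep ['a','y','a'] t) with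
    | false => rfl
    | true =>
      exfalso
      rw [show (['y','e'].isPrefixOf (c :: rep ['a','y','a'] t))
          = (('y' == c) && ['e'].isPrefixOf (rep ['a','y','a'] t)) from rfl] at hx
      simp only [Bool.and_eq_true, beq_iff_eq] at hx
      obtain ⟨hc, he⟩ := hx
      subst hc
      have hh := (prefix1 'e' _).mp he
      rcases rep_head _ _ _ hh with hs | ht
      · exact absurd hs (by decide)
      · cases t with
        | nil => simp at ht
        | cons d t' =>
          simp only [List.head?_cons, Option.some.injEq] at ht
          subst ht
          rw [show (['y','e'].isPrefixOf ('y'::'e'::t')) = true from rfl] at h2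
          simp at h2
  rw [rep_cons_f _ _ _ n2]
  have n3 : ['w','o','o'].isPrefixOf (c :: rep ['y','e'] (rep ['a','y','a'] t)) = false := by
    cases hx : ['w','o','o'].isPrefixOf (c :: rep ['y','e'] (rep ['a','y','a'] t)) with
    | false => rfl
    | true =>
      exfalso
      rw [show (['w','o','o'].isPrefixOf (c :: rep ['y','e'] (rep ['a','y','a'] t)))
          = (('w' == c) && ['o','o'].isPrefixOf (rep ['y','e'] (rep ['a','y','a'] t))) from rfl] at hx
      simp only [Bool.and_eq_true, beq_iff_eq] at hx
      obtain ⟨hc, hoo⟩ := hx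
      subst hc
      have := oo_lift t hoo
      rw [show (['w','o','o'].isPrefixOf ('w'::t)) = (['o','o'].isPrefixOf t) from rfl] at h3
      rw [this] at h3
      simp at h3
  rw [rep_cons_f _ _ _ n3]
  have n4 : ['m','a'].isPrefixOf
      (c :: rep ['w','o','o'] (rep ['y','e'] (rep ['a','y','a'] t))) = false := by
    cases hx : ['m','a'].isPrefixOf (c :: rep ['w','o','o'] (rep ['y','e'] (rep ['a','y','a'] t))) with
    | false => rfl
    | true =>
      exfalso
      rw [show (['m','a'].isPrefixOf (c :: rep ['w','o','o'] (rep ['y','e'] (rep ['a','y','a'] t))))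
          = (('m' == c) && ['a'].isPrefixOf (rep ['w','o','o'] (rep ['y','e'] (rep ['a','y','a'] t)))) from rfl] at hx
      simp only [Bool.and_eq_true, beq_iff_eq] at hx
      obtain ⟨hc, ha⟩ := hx
      subst hc
      have hh := (prefix1 'a' _).mp ha
      rcases pipe_head3 t 'a' hh with hs | ht
      · exact absurd hs (by decide)
      · cases t with
        | nil => simp at ht
        | cons d t' =>
          simp only [List.head?_cons, Option.some.injEq] at ht
          subst ht
          rw [show (['m','a'].isPrefixOf ('m'::'a'::t')) = true from rfl] at h4
          simp at h4
  rw [rep_cons_f _ _ _ n4]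

lemma main_lemma : ∀ (n : Nat) (w : List Char), w.length ≤ n →
    (pipe w).all PySem.Chars.isspace = okChars w := by
  intro n
  induction n with
  | zero =>
    intro w h
    have hw : w = [] := by cases w <;> simp_all
    subst hw
    rw [pipe_nil, okChars]
    rfl
  | succ n ih =>
    intro w h
    cases w with
    | nil =>
      rw [pipe_nil, okChars]
      rfl
    | cons c t =>
      simp only [List.length_cons] at h
      by_cases h1 : ['a','y','a'].isPrefixOf (c :: t) = true
      · -- aya branch: c = 'a', t = 'y' :: 'a' :: u
        cases t with
        | nil => exact absurd h1 (npf (by rw [show (['a','y','a'].isPrefixOf [c]) = (('a' == c) && false) from rfl]; simp))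
        | cons d t2 =>
          cases t2 with
          | nil => exact absurd h1 (npf (by rw [show (['a','y','a'].isPrefixOf [c, d]) = (('a' == c) && (('y' == d) && false)) from rfl]; simp))
          | cons e u =>
            rw [show (['a','y','a'].isPrefixOf (c::d::e::u))
                = (('a' == c) && (('y' == d) && (('a' == e) && true))) from rfl] at h1
            simp only [Bool.and_true, Bool.and_eq_true, beq_iff_eq] at h1
            obtain ⟨hc, hd, he⟩ := h1
            subst hc; subst hd; subst he
            rw [pipe_aya u, okChars,
              if_pos (show (['a','y','a'].isPrefixOf ('a'::'y'::'a'::u)) = true by rfl)]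
            rw [show List.drop 2 ('y'::'a'::u) = u from rfl]
            simp only [List.all_cons, show PySem.Chars.isspace ' ' = true from rfl, Bool.true_and]
            exact ih u (by simp only [List.length_cons] at h ⊢; omega)
      · by_cases h2 : ['y','e'].isPrefixOf (c :: t) = true
        · -- ye branch: c = 'y', t = 'e' :: u
          cases t with
          | nil => exact absurd h2 (npf (by rw [show (['y','e'].isPrefixOf [c]) = (('y' == c) && false) from rfl]; simp))
          | cons d u =>
            rw [show (['y','e'].isPrefixOf (c::d::u))
                = (('y' == c) && (('e' == d) && true)) from rfl] at h2
            simp only [Bool.and_true, Bool.and_eq_true, beq_iff_eq] at h2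
            obtain ⟨hc, hd⟩ := h2
            subst hc; subst hd
            rw [pipe_ye u, okChars,
              if_neg (npf (show (['a','y','a'].isPrefixOf ('y'::'e'::u)) = false by rfl)),
              if_pos (show (['y','e'].isPrefixOf ('y'::'e'::u)) = true by rfl)]
            rw [show List.drop 1 ('e'::u) = u from rfl]
            simp only [List.all_cons, show PySem.Chars.isspace ' ' = true from rfl, Bool.true_and]
            exact ih u (by simp only [List.length_cons] at h ⊢; omega)
        · by_cases h3 : ['w','o','o'].isPrefixOf (c :: t) = true
          · -- woo branch: c = 'w', t = 'o' :: 'o' :: u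
            cases t with
            | nil => exact absurd h3 (npf (by rw [show (['w','o','o'].isPrefixOf [c]) = (('w' == c) && false) from rfl]; simp))
            | cons d t2 =>
              cases t2 with
              | nil => exact absurd h3 (npf (by rw [show (['w','o','o'].isPrefixOf [c, d]) = (('w' == c) && (('o' == d) && false)) from rfl]; simp))
              | cons e u =>
                rw [show (['w','o','o'].isPrefixOf (c::d::e::u))
                    = (('w' == c) && (('o' == d) && (('o' == e) && true))) from rfl] at h3
                simp only [Bool.and_true, Bool.and_eq_true, beq_iff_eq] at h3
                obtain ⟨hc, hd, he⟩ := h3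
                subst hc; subst hd; subst he
                rw [pipe_woo u, okChars,
                  if_neg (npf (show (['a','y','a'].isPrefixOf ('w'::'o'::'o'::u)) = false by rfl)),
                  if_neg (npf (show (['y','e'].isPrefixOf ('w'::'o'::'o'::u)) = false by rfl)),
                  if_pos (show (['w','o','o'].isPrefixOf ('w'::'o'::'o'::u)) = true by rfl)]
                rw [show List.drop 2 ('o'::'o'::u) = u from rfl]
                simp only [List.all_cons, show PySem.Chars.isspace ' ' = true from rfl, Bool.true_and]
                exact ih u (by simp only [List.length_cons] at h ⊢; omega)
          · by_cases h4 : ['m','a'].isPrefixOf (c :: t) = true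
            · -- ma branch: c = 'm', t = 'a' :: u
              cases t with
              | nil => exact absurd h4 (npf (by rw [show (['m','a'].isPrefixOf [c]) = (('m' == c) && false) from rfl]; simp))
              | cons d u =>
                rw [show (['m','a'].isPrefixOf (c::d::u))
                    = (('m' == c) && (('a' == d) && true)) from rfl] at h4
                simp only [Bool.and_true, Bool.and_eq_true, beq_iff_eq] at h4
                obtain ⟨hc, hd⟩ := h4
                subst hc; subst hd
                by_cases hya : ['y','a'].isPrefixOf u = true
                · -- overlap: u = 'y' :: 'a' :: v, both sides are false
                  cases u with
                  | nil => exact absurd hya (npf rfl)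
                  | cons e v' =>
                    cases v' with
                    | nil => exact absurd hya (npf (by rw [show (['y','a'].isPrefixOf [e]) = (('y' == e) && false) from rfl]; simp))
                    | cons f v =>
                      rw [show (['y','a'].isPrefixOf (e::f::v))
                          = (('y' == e) && (('a' == f) && true)) from rfl] at hya
                      simp only [Bool.and_true, Bool.and_eq_true, beq_iff_eq] at hya
                      obtain ⟨he, hf⟩ := hya
                      subst he; subst hf
                      rw [pipe_maya v]
                      rw [okChars,
                        if_neg (npf (show (['a','y','a'].isPrefixOf ('m'::'a'::'y'::'a'::v)) = false by rfl)),
                        if_neg (npf (show (['y','e'].isPrefixOf ('m'::'a'::'y'::'a'::v)) = false by rfl)),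
                        if_neg (npf (show (['w','o','o'].isPrefixOf ('m'::'a'::'y'::'a'::v)) = false by rfl)),
                        if_pos (show (['m','a'].isPrefixOf ('m'::'a'::'y'::'a'::v)) = true by rfl)]
                      rw [show List.drop 1 ('a'::'y'::'a'::v) = 'y'::'a'::v from rfl]
                      rw [okChars,
                        if_neg (npf (show (['a','y','a'].isPrefixOf ('y'::'a'::v)) = false by rfl)),
                        if_neg (npf (show (['y','e'].isPrefixOf ('y'::'a'::v)) = false by rfl)),
                        if_neg (npf (show (['w','o','o'].isPrefixOf ('y'::'a'::v)) = false by rfl)),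
                        if_neg (npf (show (['m','a'].isPrefixOf ('y'::'a'::v)) = false by rfl))]
                      simp only [List.all_cons, show PySem.Chars.isspace 'm' = false from rfl,
                        show PySem.Chars.isspace 'y' = false from rfl, Bool.false_and]
                · have hya' : ['y','a'].isPrefixOf u = false := bfalse hya
                  rw [pipe_ma u hya']
                  rw [okChars,
                    if_neg (npf (show (['a','y','a'].isPrefixOf ('m'::'a'::u)) = false by rfl)),
                    if_neg (npf (show (['y','e'].isPrefixOf ('m'::'a'::u)) = false by rfl)),
                    if_neg (npf (show (['w','o','o'].isPrefixOf ('m'::'a'::u)) = false by rfl)),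
                    if_pos (show (['m','a'].isPrefixOf ('m'::'a'::u)) = true by rfl)]
                  rw [show List.drop 1 ('a'::u) = u from rfl]
                  simp only [List.all_cons, show PySem.Chars.isspace ' ' = true from rfl, Bool.true_and]
                  exact ih u (by simp only [List.length_cons] at h ⊢; omega)
            · -- catch-all branch
              rw [pipe_other c t (bfalse h1) (bfalse h2) (bfalse h3) (bfalse h4)]
              rw [okChars, if_neg h1, if_neg h2, if_neg h3, if_neg h4]
              simp only [List.all_cons]
              rw [ih t (by omega)]

-- per-word agreement of A's test with B's scan
lemma word_eq (w : String) :
    (PySem.Str.strip (PySem.Str.replace (PySem.Str.replace (PySem.Str.replace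
        (PySem.Str.replace w "aya" " ") "ye" " ") "woo" " ") "ma" " ") == "")
      = okChars w.toList := by
  rw [Bool.beq_eq_decide_eq]
  have hlist : (PySem.Str.strip (PySem.Str.replace (PySem.Str.replace (PySem.Str.replace
      (PySem.Str.replace w "aya" " ") "ye" " ") "woo" " ") "ma" " ")).toList
      = PySem.Chars.strip (pipe w.toList) := by
    simp only [PySem.Str.strip, PySem.Str.replace, String.toList_ofList]
    rw [show ("aya" : String).toList = ['a','y','a'] from by decide,
        show ("ye" : String).toList = ['y','e'] from by decide,
        show ("woo" : String).toList = ['w','o','o'] from by decide,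
        show ("ma" : String).toList = ['m','a'] from by decide,
        show (" " : String).toList = [' '] from by decide]
    rw [replace_eq_rep ['a','y','a'] (by simp) w.toList,
        replace_eq_rep ['y','e'] (by simp) _,
        replace_eq_rep ['w','o','o'] (by simp) _,
        replace_eq_rep ['m','a'] (by simp) _]
    rfl
  have hiff : (PySem.Str.strip (PySem.Str.replace (PySem.Str.replace (PySem.Str.replace
      (PySem.Str.replace w "aya" " ") "ye" " ") "woo" " ") "ma" " ") = "")
      ↔ ((pipe w.toList).all PySem.Chars.isspace = true) := by
    rw [← String.toList_eq_nil_iff, hlist, strip_eq_nil_iff]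
  rw [show (decide (PySem.Str.strip (PySem.Str.replace (PySem.Str.replace (PySem.Str.replace
      (PySem.Str.replace w "aya" " ") "ye" " ") "woo" " ") "ma" " ") = ""))
      = (decide ((pipe w.toList).all PySem.Chars.isspace = true)) from by
    rw [decide_eq_decide]; exact hiff]
  rw [show (decide ((pipe w.toList).all PySem.Chars.isspace = true))
      = (pipe w.toList).all PySem.Chars.isspace from Bool.decide_eq_true]
  exact main_lemma (w.toList.length) w.toList (le_refl _)

-- ===== VERDICT =====
theorem solution_spec : Claim_equal_solution := by
  intro babbling _
  show solution babbling = solution_alt babbling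
  unfold solution solution_alt
  apply PySem.List.foldl_congr_mem
  intro acc x hx
  simp only [List.foldl]
  simp only [word_eq]
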